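-- pv_equiv track=rewrite | github.com/Emory-OMOP/info | scripts/update_dqd_summary.py | _grouped_check_lines
-- ===== SOURCE A (Python) =====
-- def _grouped_check_lines(
--     cids: list[str],
--     check_details: dict[str, dict],
--     indent: str = "    ",
-- ) -> list[str]:
--     """Format check IDs into markdown lines, grouping by (field, check_name).
--
--     When multiple concept IDs share the same field + check_name, they are
--     collapsed into a single line with a count suffix.
--     """
--     grouped: dict[tuple[str, str], int] = {}
--     for cid in cids:
--         d = check_details.get(cid, {})
--         key = (d.get("field", ""), d.get("check_name", "") or d.get("description", ""))
--         grouped[key] = grouped.get(key, 0) + 1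
--
--     lines = []
--     for (field, desc), count in sorted(grouped.items()):
--         label = f"`{field}`" if field else "table-level"
--         suffix = f" ({count} concepts)" if count > 1 else ""
--         if desc:
--             lines.append(f"{indent}- {label} — {desc}{suffix}")
--         else:
--             lines.append(f"{indent}- {label}{suffix}")
--     return lines
-- ===== SOURCE B (Python) =====
-- from itertools import groupby
--
--
-- def _grouped_check_lines(
--     cids: list[str],
--     check_details: dict[str, dict],
--     indent: str = "    ",
-- ) -> list[str]:
--     """Sort the key tuples and count consecutive runs with groupby (no counting dict)."""
--
--     def key(cid):
--         d = check_details.get(cid, {})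
--         return (d.get("field", ""), d.get("check_name", "") or d.get("description", ""))
--
--     lines = []
--     for (field, desc), grp in groupby(sorted(map(key, cids))):
--         count = sum(1 for _ in grp)
--         label = f"`{field}`" if field else "table-level"
--         suffix = f" ({count} concepts)" if count > 1 else ""
--         if desc:
--             lines.append(f"{indent}- {label} — {desc}{suffix}")
--         else:
--             lines.append(f"{indent}- {label}{suffix}")
--     return lines
-- ===== Notes on version B (the rewrite author's own statement) =====
-- stated objective: idiomatic
-- what changed: B drops A's counting dict entirely: it maps each cid to its (field, check_name-or-description) key tuple, sorts the tuples, and counts consecutive runs with itertools.groupby, emitting the same markdown line per run.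
import Mathlib
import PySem

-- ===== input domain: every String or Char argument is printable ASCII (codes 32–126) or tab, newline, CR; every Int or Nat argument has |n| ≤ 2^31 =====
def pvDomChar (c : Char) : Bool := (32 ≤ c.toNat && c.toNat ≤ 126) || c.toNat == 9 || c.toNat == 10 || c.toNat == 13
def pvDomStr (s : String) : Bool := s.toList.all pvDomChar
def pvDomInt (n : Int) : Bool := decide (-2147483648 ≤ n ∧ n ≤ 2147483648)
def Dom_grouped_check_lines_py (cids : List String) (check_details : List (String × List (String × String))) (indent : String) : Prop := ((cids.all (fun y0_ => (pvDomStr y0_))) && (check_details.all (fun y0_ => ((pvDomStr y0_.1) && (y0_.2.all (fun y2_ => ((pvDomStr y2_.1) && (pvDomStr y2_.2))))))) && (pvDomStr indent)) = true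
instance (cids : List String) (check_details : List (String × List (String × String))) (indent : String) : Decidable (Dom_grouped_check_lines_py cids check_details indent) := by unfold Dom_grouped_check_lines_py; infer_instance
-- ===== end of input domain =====

-- B replaces A's counting dict by sorting the key tuples and counting consecutive runs
-- (itertools.groupby); same output, an alternative decomposition of similar cost.

-- shared helpers (identical in both Pythons): key extraction and line formatting
def pvKey (check_details : List (String × List (String × String))) (cid : String) : String × String :=
  let d := (PySem.Dict.mk check_details).getD cid []
  let field := (PySem.Dict.mk d).getD "field" ""
  let cn := (PySem.Dict.mk d).getD "check_name" ""
  -- Python 'a or b' on strings: a if a is non-empty ("truthy") else b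
  (field, if cn = "" then (PySem.Dict.mk d).getD "description" "" else cn)

def pvLine (indent field desc : String) (count : Int) : String :=
  let label := if field ≠ "" then "`" ++ field ++ "`" else "table-level"
  let suffix := if count > 1 then " (" ++ PySem.Int.toStr count ++ " concepts)" else ""
  if desc ≠ "" then indent ++ "- " ++ label ++ " — " ++ desc ++ suffix
  else indent ++ "- " ++ label ++ suffix

-- ===== PORT A =====
-- sorted(grouped.items()) compares Python tuples ((field, desc), count) lexicographically:
-- field, then desc, then count — exactly the flattened Lex key below.
def grouped_check_lines_py (cids : List String) (check_details : List (String × List (String × String))) (indent : String) : List String :=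
  let grouped : PySem.Dict (String × String) Int :=
    cids.foldl (fun g cid =>
      let key := pvKey check_details cid
      g.insert key (g.getD key 0 + 1)) PySem.Dict.empty
  let sortedItems := PySem.List.sorted grouped.items
    (fun p => toLex (p.1.1, toLex (p.1.2, p.2))) false
  sortedItems.foldl (fun lines p => lines ++ [pvLine indent p.1.1 p.1.2 p.2]) []

-- ===== PORT B =====
-- itertools.groupby over a sorted list: each maximal run of equal keys becomes (key, run length)
def pvRuns : List (String × String) → List ((String × String) × Int)
  | [] => []
  | x :: xs =>
      (x, 1 + ((xs.takeWhile (fun y => y == x)).length : Int)) ::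
        pvRuns (xs.dropWhile (fun y => y == x))
termination_by l => l.length
decreasing_by
  simp only [List.length_cons]
  exact Nat.lt_succ_of_le ((xs.dropWhile_sublist (fun y => y == x)).length_le)

def grouped_check_lines_py_alt (cids : List String) (check_details : List (String × List (String × String))) (indent : String) : List String :=
  let keys := PySem.List.sorted (cids.map (pvKey check_details)) (fun k => toLex k) false
  (pvRuns keys).map (fun p => pvLine indent p.1.1 p.1.2 p.2)

-- ===== PRECONDITION & SPEC =====
def Spec_grouped_check_lines_py (cids : List String) (check_details : List (String × List (String × String))) (indent : String) (out : List String) : Prop := out = grouped_check_lines_py_alt cids check_details indent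
instance (cids : List String) (check_details : List (String × List (String × String))) (indent : String) (out : List String) : Decidable (Spec_grouped_check_lines_py cids check_details indent out) := by unfold Spec_grouped_check_lines_py; infer_instance

-- ===== CLAIM (what is proved, stated in full; the proofs are below) =====
def Claim_equal_grouped_check_lines_py : Prop := ∀ (cids : List String) (check_details : List (String × List (String × String))) (indent : String), Dom_grouped_check_lines_py cids check_details indent → Spec_grouped_check_lines_py cids check_details indent (grouped_check_lines_py cids check_details indent)

-- ===== LEMMAS AND PROOFS =====

-- adding elements already in the set accumulator is a no-op
lemma pv_foldl_add_mem (t : List (String × String)) :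
    ∀ s : PySem.Set (String × String), (∀ y ∈ t, s.contains y = true) →
      t.foldl PySem.Set.add s = s := by
  induction t with
  | nil => intro s _; rfl
  | cons y t ih =>
      intro s h
      simp only [List.foldl_cons]
      rw [show PySem.Set.add s y = s by simp only [PySem.Set.add, h y (by simp), if_true]]
      exact ih s (fun z hz => h z (by simp [hz]))

-- an accumulator head distinct from everything added stays in front
lemma pv_foldl_add_cons (d : List (String × String)) :
    ∀ (s : List (String × String)) (x : String × String), (∀ y ∈ d, y ≠ x) →
      d.foldl PySem.Set.add (x :: s) = x :: d.foldl PySem.Set.add s := by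
  induction d with
  | nil => intro s x _; rfl
  | cons y d ih =>
      intro s x h
      have hyx : y ≠ x := h y (by simp)
      simp only [List.foldl_cons]
      have : PySem.Set.add (x :: s) y = x :: PySem.Set.add s y := by
        simp only [PySem.Set.add, PySem.Set.contains, List.contains_cons]
        rw [show (y == x) = false by simp [beq_eq_false_iff_ne, hyx]]
        simp only [Bool.false_or]
        split <;> simp
      rw [this, ih _ x (fun z hz => h z (by simp [hz]))]

-- everything the dropWhile part of a sorted list contains is strictly above the head
lemma pv_drop_lt (x : String × String) (xs : List (String × String))
    (hx : ∀ y ∈ xs, toLex x ≤ toLex y)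
    (hp : xs.Pairwise (fun a b => toLex a ≤ toLex b)) :
    ∀ y ∈ xs.dropWhile (fun y => y == x), toLex x < toLex y := by
  induction xs with
  | nil => simp
  | cons z zs ih =>
      by_cases hz : (z == x) = true
      · rw [List.dropWhile_cons]
        simp only [hz, if_true]
        exact ih (fun y hy => hx y (by simp [hy])) (List.pairwise_cons.mp hp).2
      · rw [List.dropWhile_cons]
        simp only [hz]
        have hzx : z ≠ x := by simpa using hz
        have hxz : toLex x < toLex z := by
          refine lt_of_le_of_ne (hx z (by simp)) (fun e => hzx ?_)
          exact (toLex.injective e).symm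
        intro y hy
        rcases List.mem_cons.mp hy with rfl | hy
        · exact hxz
        · exact lt_of_lt_of_le hxz ((List.pairwise_cons.mp hp).1 y hy)

lemma pv_dedup_cons (x : String × String) (xs : List (String × String))
    (h : (x :: xs).Pairwise (fun a b => toLex a ≤ toLex b)) :
    PySem.List.dedup (x :: xs) = x :: PySem.List.dedup (xs.dropWhile (fun y => y == x)) := by
  obtain ⟨hx, hp⟩ := List.pairwise_cons.mp h
  have hlt := pv_drop_lt x xs hx hp
  have hne : ∀ y ∈ xs.dropWhile (fun y => y == x), y ≠ x :=
    fun y hy e => absurd (hlt y hy) (by rw [e]; exact lt_irrefl _)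
  simp only [PySem.List.dedup_eq_ofList, PySem.Set.ofList_eq_foldl]
  have h0 : PySem.Set.add ([] : PySem.Set (String × String)) x = [x] := rfl
  rw [List.foldl_cons, h0,
      ← List.takeWhile_append_dropWhile (p := fun y => y == x) (l := xs),
      List.foldl_append,
      pv_foldl_add_mem _ [x] (fun y hy => by
        have := List.mem_takeWhile_imp hy
        simp only [beq_iff_eq] at this
        simp [PySem.Set.contains, this]),
      pv_foldl_add_cons _ [] x hne]
  rw [List.takeWhile_append_dropWhile]

lemma pv_runs_eq (m : List (String × String))
    (h : m.Pairwise (fun a b => toLex a ≤ toLex b)) :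
    pvRuns m = (PySem.List.dedup m).map (fun k => (k, (m.count k : Int))) := by
  induction m using pvRuns.induct with
  | case1 => simp [pvRuns, PySem.List.dedup_eq_ofList, PySem.Set.ofList_eq_foldl]
  | case2 x xs ih =>
      obtain ⟨hx, hp⟩ := List.pairwise_cons.mp h
      have hlt := pv_drop_lt x xs hx hp
      have hne : ∀ y ∈ xs.dropWhile (fun y => y == x), y ≠ x :=
        fun y hy e => absurd (hlt y hy) (by rw [e]; exact lt_irrefl _)
      have ht : ∀ y ∈ xs.takeWhile (fun y => y == x), y = x := fun y hy => by
        have := List.mem_takeWhile_imp hy; simpa using this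
      have hd : (xs.dropWhile (fun y => y == x)).Pairwise (fun a b => toLex a ≤ toLex b) :=
        hp.sublist (List.dropWhile_sublist _)
      rw [pv_dedup_cons x xs h, List.map_cons]
      simp only [pvRuns]
      rw [ih hd]
      refine List.cons_eq_cons.mpr ⟨?_, ?_⟩
      · -- head: the run length is the count of x in x :: xs
        have hsplit : List.count x xs = (xs.takeWhile (fun y => y == x)).length := by
          conv_lhs => rw [← List.takeWhile_append_dropWhile (p := fun y => y == x) (l := xs)]
          rw [List.count_append, List.count_eq_length.mpr (fun b hb => (ht b hb).symm),
              List.count_eq_zero.mpr (fun hmem => absurd rfl (hne x hmem))]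
          omega
        have hcx : List.count x (x :: xs) = 1 + (xs.takeWhile (fun y => y == x)).length := by
          rw [List.count_cons_self, hsplit]; omega
        rw [hcx]
        push_cast
        ring_nf
      · -- tail: counts in the dropWhile part agree with counts in the whole list
        refine List.map_congr_left (fun k hk => ?_)
        have hkd : k ∈ xs.dropWhile (fun y => y == x) := (PySem.List.mem_dedup _ _).mp hk
        have hkx : k ≠ x := hne k hkd
        have hck : List.count k (x :: xs) = List.count k (xs.dropWhile (fun y => y == x)) := by
          have h1 : List.count k (x :: xs) = List.count k xs := by
            have hxk : ¬ x = k := fun e => hkx e.symm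
            simp [hxk]
          rw [h1]
          conv_lhs => rw [← List.takeWhile_append_dropWhile (p := fun y => y == x) (l := xs)]
          rw [List.count_append, List.count_eq_zero.mpr (fun hmem => hkx (ht k hmem)),
              Nat.zero_add]
        rw [hck]

lemma pv_dedup_pairwise_lt (m : List (String × String))
    (h : m.Pairwise (fun a b => toLex a ≤ toLex b)) :
    (PySem.List.dedup m).Pairwise (fun a b => toLex a < toLex b) := by
  induction m using pvRuns.induct with
  | case1 => simp [PySem.List.dedup_eq_ofList, PySem.Set.ofList_eq_foldl]
  | case2 x xs ih =>
      obtain ⟨hx, hp⟩ := List.pairwise_cons.mp h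
      have hlt := pv_drop_lt x xs hx hp
      have hd : (xs.dropWhile (fun y => y == x)).Pairwise (fun a b => toLex a ≤ toLex b) :=
        hp.sublist (List.dropWhile_sublist _)
      rw [pv_dedup_cons x xs h]
      exact List.pairwise_cons.mpr
        ⟨fun y hy => hlt y ((PySem.List.mem_dedup _ _).mp hy), ih hd⟩

-- ===== VERDICT (by name: the statement is the Claim_ definition above) =====
-- lifting strict order on keys to strict order on the flattened item key
lemma pv_keyI_lt (a b : String × String) (c c' : Int) (h : toLex a < toLex b) :
    toLex (a.1, toLex (a.2, c)) < toLex (b.1, toLex (b.2, c')) := by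
  rw [Prod.Lex.lt_iff] at h ⊢
  simp only [ofLex_toLex] at h ⊢
  rcases h with h | ⟨he, h⟩
  · exact Or.inl h
  · exact Or.inr ⟨he, by rw [Prod.Lex.lt_iff]; exact Or.inl h⟩

lemma pv_main (ks : List (String × String)) :
    PySem.List.sorted ((PySem.Set.ofList ks).map (fun k => (k, (ks.count k : Int))))
        (fun p => toLex (p.1.1, toLex (p.1.2, p.2))) false
      = pvRuns (PySem.List.sorted ks (fun k => toLex k) false) := by
  have hsp : (PySem.List.sorted ks (fun k => toLex k) false).Pairwise
      (fun a b => toLex a ≤ toLex b) := PySem.List.sorted_pairwise ks _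
  have hruns := pv_runs_eq _ hsp
  have hcnt : ∀ k, (PySem.List.sorted ks (fun k => toLex k) false).count k = ks.count k :=
    fun k => (PySem.List.sorted_perm ks _ _).count_eq k
  have hruns' : pvRuns (PySem.List.sorted ks (fun k => toLex k) false)
      = (PySem.List.dedup (PySem.List.sorted ks (fun k => toLex k) false)).map
          (fun k => (k, (ks.count k : Int))) := by
    rw [hruns]; exact List.map_congr_left (fun k _ => by rw [hcnt k])
  apply PySem.List.sorted_eq_of_perm_of_pairwise_lt
  · -- permutation with the counter's items
    rw [hruns', ← PySem.List.dedup_eq_ofList]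
    refine List.Perm.map _ ?_
    refine (List.perm_ext_iff_of_nodup (PySem.List.nodup_dedup _) (PySem.List.nodup_dedup _)).mpr
      (fun a => ?_)
    rw [PySem.List.mem_dedup, PySem.List.mem_dedup, PySem.List.mem_sorted]
  · -- strictly increasing in the item sort key
    rw [hruns', List.pairwise_map]
    exact (pv_dedup_pairwise_lt _ hsp).imp (fun h => pv_keyI_lt _ _ _ _ h)

theorem grouped_check_lines_py_spec : Claim_equal_grouped_check_lines_py := by
  intro cids cd indent _
  unfold Spec_grouped_check_lines_py grouped_check_lines_py grouped_check_lines_py_alt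
  have h1 : cids.foldl (fun g cid =>
        let key := pvKey cd cid
        g.insert key (g.getD key 0 + 1)) PySem.Dict.empty
      = PySem.Dict.counter (cids.map (pvKey cd)) := by
    rw [← PySem.Dict.foldl_insert_getD_add_one_eq_counter, List.foldl_map]
  rw [h1, PySem.List.foldl_append_singleton_eq_map, List.nil_append,
      PySem.Dict.items_counter, pv_main]
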